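-- pv_equiv track=rewrite | github.com/radup99/LeetCode | 0014-Longest-Common-Prefix/solution.py | findMinLengthWords
-- ===== SOURCE A (Python) =====
-- from typing import List
--
-- def findMinLengthWords(strs: List[str]) -> List[str]:
--     minWords = [strs[0]]
--     minLen = len(strs[0])
--
--     for st in strs[1:]:
--         if len(st) < minLen:
--             minWords = [st]
--             minLen = len(st)
--         elif len(st) == minLen:
--             minWords.append(st)
--
--     return minWords
-- ===== SOURCE B (Python) =====
-- from typing import List
--
-- def findMinLengthWords(strs: List[str]) -> List[str]:
--     minLen = len(strs[0])
--     for s in strs: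
--         if len(s) < minLen:
--             minLen = len(s)
--     return [s for s in strs if len(s) == minLen]
-- ===== Notes on version B (the rewrite author's own statement) =====
-- stated objective: simpler
-- what changed: Two separate simple passes (compute the minimum length, then filter the list for strings of that length) instead of A's single interleaved scan that rebuilds/extends the candidate list as the running minimum changes.
import Mathlib
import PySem

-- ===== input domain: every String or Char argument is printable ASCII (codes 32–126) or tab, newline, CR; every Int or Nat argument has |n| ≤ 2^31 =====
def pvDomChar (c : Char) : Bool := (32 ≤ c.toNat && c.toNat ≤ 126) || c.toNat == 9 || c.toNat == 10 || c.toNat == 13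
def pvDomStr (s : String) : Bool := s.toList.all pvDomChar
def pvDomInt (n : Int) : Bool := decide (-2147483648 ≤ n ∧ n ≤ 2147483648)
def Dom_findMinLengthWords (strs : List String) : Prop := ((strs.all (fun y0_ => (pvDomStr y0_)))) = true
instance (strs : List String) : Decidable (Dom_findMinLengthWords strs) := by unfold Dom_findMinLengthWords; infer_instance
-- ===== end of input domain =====

-- B replaces A's single interleaved scan (rebuilding the candidate list as the running
-- minimum drops) by two plain passes: fold for the minimum length, then filter; same O(n) cost.

-- ===== PORT A =====
-- one loop step of A: reset the list on a strictly shorter word, append on a tie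
def pvStepA (p : List String × Int) (st : String) : List String × Int :=
  if PySem.Str.len st < p.2 then ([st], PySem.Str.len st)
  else if PySem.Str.len st = p.2 then (p.1 ++ [st], p.2)
  else p

def findMinLengthWords (strs : List String) : List String :=
  match strs with
  | [] => []          -- strs[0] raises IndexError here; excluded by Pre_
  | s0 :: rest =>     -- minWords = [strs[0]], minLen = len(strs[0]); loop over strs[1:]
    (rest.foldl pvStepA ([s0], PySem.Str.len s0)).1

-- ===== PORT B =====
-- one loop step of B: running minimum of the lengths
def pvLenMin (m : Int) (s : String) : Int :=
  if PySem.Str.len s < m then PySem.Str.len s else m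

def findMinLengthWords_alt (strs : List String) : List String :=
  match strs with
  | [] => []          -- strs[0] raises IndexError here; excluded by Pre_
  | s0 :: _ =>
    let minLen := strs.foldl pvLenMin (PySem.Str.len s0)
    strs.filter (fun s => PySem.Str.len s == minLen)

-- ===== PRECONDITION & SPEC =====
-- Pre_ excludes only the empty list, on which both Pythons raise IndexError at strs[0].
def Pre_findMinLengthWords (strs : List String) : Prop := strs ≠ []
instance (strs : List String) : Decidable (Pre_findMinLengthWords strs) := by
  unfold Pre_findMinLengthWords; infer_instance

def pvWitness_findMinLengthWords : List String := ["ab", "c", "de"]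

def Spec_findMinLengthWords (strs : List String) (out : List String) : Prop := out = findMinLengthWords_alt strs
instance (strs : List String) (out : List String) : Decidable (Spec_findMinLengthWords strs out) := by unfold Spec_findMinLengthWords; infer_instance

-- ===== CLAIM (what is proved, stated in full; the proofs are below) =====
def Claim_equal_findMinLengthWords : Prop := ∀ (strs : List String), Dom_findMinLengthWords strs → Pre_findMinLengthWords strs → Spec_findMinLengthWords strs (findMinLengthWords strs)

-- ===== LEMMAS AND PROOFS =====

lemma pvLenMin_le (m : Int) (s : String) : pvLenMin m s ≤ m := by
  unfold pvLenMin; split <;> omega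

lemma foldMin_le (rest : List String) (m : Int) : rest.foldl pvLenMin m ≤ m := by
  induction rest generalizing m with
  | nil => simp
  | cons s rest ih =>
      calc (s :: rest).foldl pvLenMin m = rest.foldl pvLenMin (pvLenMin m s) := rfl
        _ ≤ pvLenMin m s := ih _
        _ ≤ m := pvLenMin_le m s

-- characterisation of A's loop: the final state is the minimum and, in order,
-- (the old candidates if the minimum did not drop, followed by) all words of that length
lemma loopA_eq (rest ws : List String) (m : Int) :
    rest.foldl pvStepA (ws, m) =
      ((if rest.foldl pvLenMin m < m then [] else ws)
        ++ rest.filter (fun s => PySem.Str.len s == rest.foldl pvLenMin m),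
       rest.foldl pvLenMin m) := by
  induction rest generalizing ws m with
  | nil => simp
  | cons st rest ih =>
      simp only [List.foldl_cons]
      by_cases h1 : (st.length : Int) < m
      · have hmin : pvLenMin m st = (st.length : Int) := by simp [pvLenMin, h1]
        have hle' : rest.foldl pvLenMin (st.length : Int) ≤ (st.length : Int) :=
          foldMin_le _ _
        by_cases h2 : rest.foldl pvLenMin (st.length : Int) < (st.length : Int)
        · simp [pvStepA, h1, ih, hmin, h2, List.filter_cons,
                (by omega : rest.foldl pvLenMin (st.length : Int) < m)]; omega
        · have heq : rest.foldl pvLenMin (st.length : Int) = (st.length : Int) := by omega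
          simp [pvStepA, h1, ih, hmin, heq]
      · have hmin : pvLenMin m st = m := by simp [pvLenMin, h1]
        have hle'' : rest.foldl pvLenMin m ≤ m := foldMin_le rest m
        by_cases h2 : (st.length : Int) = m
        · by_cases h3 : rest.foldl pvLenMin m < m
          · simp [pvStepA, h2, ih, hmin, h3, List.filter_cons]; omega
          · have heq : rest.foldl pvLenMin m = m := by omega
            simp [pvStepA, h2, ih, hmin, heq]
        · simp [pvStepA, h1, h2, ih, hmin, List.filter_cons]; omega

-- ===== VERDICT (by name: the statement is the Claim_ definition above) =====
theorem findMinLengthWords_spec : Claim_equal_findMinLengthWords := by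
  intro strs _ hpre
  unfold Spec_findMinLengthWords
  cases strs with
  | nil => exact absurd rfl hpre
  | cons s0 rest =>
      have hle : rest.foldl pvLenMin ((s0.length : Int)) ≤ (s0.length : Int) := by
        simpa using foldMin_le rest (PySem.Str.len s0)
      have hfirst : pvLenMin (PySem.Str.len s0) s0 = PySem.Str.len s0 := by
        simp [pvLenMin]
      simp only [findMinLengthWords, findMinLengthWords_alt, List.foldl_cons, hfirst]
      rw [loopA_eq]
      by_cases h : rest.foldl pvLenMin (s0.length : Int) < (s0.length : Int)
      · simp [h, List.filter_cons]; omega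
      · have heq : rest.foldl pvLenMin (s0.length : Int) = (s0.length : Int) := by omega
        simp [heq]
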